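-- pv_equiv track=rewrite | github.com/amymhaddad/algorithms | spelling_bee/spelling_bee.py | spellingBeeSolutions
-- ===== SOURCE A (Python) =====
-- def spellingBeeSolutions(wordlist, puzzles):
--     """Count the number of valid words contained in each puzzle"""
--     counter = []
--     word_counter = 0
--
--     for puzzle in puzzles:
--
--         for word in wordlist:
--
--             if len(word) < 5 or puzzle[0][0] not in word:
--                 word_counter += 0
--             elif not set(word).issubset(set(puzzle)):
--                 word_counter += 0
--
--             else:
--                 word_counter += 1
--
--         counter.append(word_counter)
--
--         word_counter = 0
--     return counter
-- ===== SOURCE B (Python) =====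
-- def spellingBeeSolutions(wordlist, puzzles):
--     """Count the number of valid words contained in each puzzle.
--
--     Inverted index: one pass over the wordlist records, for every character,
--     a bitset of the (long-enough) word indices containing it; each puzzle is
--     then answered by set algebra on these word-index bitsets plus a popcount,
--     with no per-puzzle scan of the wordlist.
--     """
--     index = {}       # char -> bitset of indices of words (len >= 5) containing it
--     long_words = 0   # bitset of word indices with len >= 5
--     bit = 1
--     for word in wordlist:
--         if len(word) >= 5:
--             long_words |= bit
--             for ch in set(word):
--                 index[ch] = index.get(ch, 0) | bit
--         bit <<= 1
--     counter = []
--     for puzzle in puzzles: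
--         if not puzzle:
--             counter.append(0)   # an empty puzzle contains no words
--             continue
--         allowed = set(puzzle)
--         bad = 0                 # words containing some character outside the puzzle
--         for ch, bits in index.items():
--             if ch not in allowed:
--                 bad |= bits
--         counter.append(bin(index.get(puzzle[0], 0) & long_words & ~bad).count("1"))
--     return counter
-- ===== Notes on version B (the rewrite author's own statement) =====
-- stated objective: faster
-- what changed: B builds an inverted index (per character, a big-integer bitset of qualifying word indices) in one pass over the wordlist and answers each puzzle by bitset algebra (first-letter bitset AND long-word bitset AND NOT union-of-forbidden-letter bitsets) plus a popcount, eliminating the per-puzzle scan of the wordlist that A performs.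
import Mathlib
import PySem

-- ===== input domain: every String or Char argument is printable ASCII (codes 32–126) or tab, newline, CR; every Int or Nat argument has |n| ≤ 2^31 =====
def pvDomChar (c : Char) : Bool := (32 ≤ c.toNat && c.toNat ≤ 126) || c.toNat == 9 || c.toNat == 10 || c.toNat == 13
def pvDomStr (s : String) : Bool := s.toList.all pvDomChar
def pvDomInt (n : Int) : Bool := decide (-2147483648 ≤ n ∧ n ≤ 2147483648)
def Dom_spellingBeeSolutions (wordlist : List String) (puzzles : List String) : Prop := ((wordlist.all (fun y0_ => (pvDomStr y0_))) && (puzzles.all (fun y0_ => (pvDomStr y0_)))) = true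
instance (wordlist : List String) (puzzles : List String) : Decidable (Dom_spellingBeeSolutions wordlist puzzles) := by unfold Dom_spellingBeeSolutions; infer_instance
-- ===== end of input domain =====

-- B replaces A's per-puzzle scan of the wordlist by an inverted index (per character, a
-- bitset of qualifying word indices) built once, answering each puzzle with bitset algebra
-- and a popcount (objective: faster).

-- ===== PORT A =====
def spellingBeeSolutions (wordlist : List String) (puzzles : List String) : List Int :=
  (puzzles.foldl (fun (st : List Int × Int) puzzle =>
      let wc := wordlist.foldl (fun (wc : Int) word =>
        if PySem.Str.len word < 5 then wc + 0            -- len(word) < 5 (short-circuits 'or')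
        else match PySem.Str.pyGet? puzzle 0 with        -- puzzle[0][0]: indexing "" raises IndexError
          | none => wc                                    -- excluded by Pre_spellingBeeSolutions
          | some c0 =>
            if !(PySem.Str.isIn (String.ofList [c0]) word) then wc + 0   -- puzzle[0][0] not in word
            else if !(PySem.Set.issubset (PySem.Set.ofList word.toList) (PySem.Set.ofList puzzle.toList)) then wc + 0
            else wc + 1) st.2
      (st.1 ++ [wc], 0)) ([], 0)).1

-- ===== PORT B =====
-- bin(v).count("1"): popcount by repeated halving
def bPopCount (n : Nat) : Nat :=
  if n = 0 then 0 else n % 2 + bPopCount (n / 2)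
decreasing_by exact Nat.div_lt_self (Nat.pos_of_ne_zero (by assumption)) (by omega)

-- the body of Source B's index-building loop over the wordlist (state: index, long_words, bit)
def bStep (st : PySem.Dict Char Nat × Nat × Nat) (word : String) : PySem.Dict Char Nat × Nat × Nat :=
  if 5 ≤ PySem.Str.len word then
    ((PySem.Set.ofList word.toList).foldl
        (fun d ch => d.insert ch (d.getD ch 0 ||| st.2.2)) st.1,   -- index[ch] = index.get(ch,0) | bit
     st.2.1 ||| st.2.2,                                            -- long_words |= bit
     st.2.2 <<< 1)                                                 -- bit <<= 1
  else (st.1, st.2.1, st.2.2 <<< 1)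

def spellingBeeSolutions_alt (wordlist : List String) (puzzles : List String) : List Int :=
  let st := wordlist.foldl bStep (PySem.Dict.empty, 0, 1)
  puzzles.map (fun puzzle =>
    if puzzle = "" then (0 : Int)                                  -- empty puzzle contains no words
    else
      let allowed := PySem.Set.ofList puzzle.toList
      let bad := st.1.items.foldl
        (fun b p => if !(PySem.Set.contains allowed p.1) then b ||| p.2 else b) 0
      match PySem.Str.pyGet? puzzle 0 with                         -- puzzle[0] (nonempty here)
      | none => (0 : Int)
      | some c0 =>
        -- x & long & ~bad on nonnegative Python ints = Nat.ldiff (x &&& long) bad, exact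
        ((bPopCount ((st.1.getD c0 0 &&& st.2.1).ldiff bad) : Nat) : Int))

-- ===== PRECONDITION & SPEC =====
-- Pre_ excludes exactly the inputs where the Python A raises IndexError: an empty
-- puzzle string while some word has length ≥ 5 (only then is puzzle[0] evaluated).
def Pre_spellingBeeSolutions (wordlist : List String) (puzzles : List String) : Prop :=
  "" ∈ puzzles → ∀ w ∈ wordlist, PySem.Str.len w < 5
instance (wordlist : List String) (puzzles : List String) : Decidable (Pre_spellingBeeSolutions wordlist puzzles) := by unfold Pre_spellingBeeSolutions; infer_instance

def pvWitness_spellingBeeSolutions : List String × List String := (["apple", "zzz"], ["pale", "q"])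

def Spec_spellingBeeSolutions (wordlist : List String) (puzzles : List String) (out : List Int) : Prop := out = spellingBeeSolutions_alt wordlist puzzles
instance (wordlist : List String) (puzzles : List String) (out : List Int) : Decidable (Spec_spellingBeeSolutions wordlist puzzles out) := by unfold Spec_spellingBeeSolutions; infer_instance

-- ===== CLAIM (what is proved, stated in full; the proofs are below) =====
def Claim_equal_spellingBeeSolutions : Prop := ∀ (wordlist : List String) (puzzles : List String), Dom_spellingBeeSolutions wordlist puzzles → Pre_spellingBeeSolutions wordlist puzzles → Spec_spellingBeeSolutions wordlist puzzles (spellingBeeSolutions wordlist puzzles)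

-- ===== LEMMAS AND PROOFS =====

-- A's inner per-word loop body (named for the proofs; definitionally the port's lambda)
def innerBody (puzzle : String) (wc : Int) (word : String) : Int :=
  if PySem.Str.len word < 5 then wc + 0
  else match PySem.Str.pyGet? puzzle 0 with
    | none => wc
    | some c0 =>
      if !(PySem.Str.isIn (String.ofList [c0]) word) then wc + 0
      else if !(PySem.Set.issubset (PySem.Set.ofList word.toList) (PySem.Set.ofList puzzle.toList)) then wc + 0
      else wc + 1

-- A's per-word predicate for a puzzle whose first character is c0
def predA (c0 : Char) (puzzle : String) (word : String) : Bool :=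
  !(PySem.Str.len word < 5) && PySem.Str.isIn (String.ofList [c0]) word
    && PySem.Set.issubset (PySem.Set.ofList word.toList) (PySem.Set.ofList puzzle.toList)

theorem inner_foldl_count (c0 : Char) (puzzle : String) (hp : PySem.Str.pyGet? puzzle 0 = some c0)
    (wl : List String) (acc : Int) :
    wl.foldl (innerBody puzzle) acc = acc + (wl.countP (predA c0 puzzle) : Int) := by
  induction wl generalizing acc with
  | nil => simp
  | cons w wl ih =>
    simp only [List.foldl_cons, innerBody, hp, List.countP_cons, predA, ih]
    split_ifs with h1 h2 h3 <;> simp_all <;> push_cast <;> ring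

theorem outer_foldl (wordlist : List String) (ps : List String) (acc : List Int) :
    (ps.foldl (fun (st : List Int × Int) puzzle =>
        (st.1 ++ [wordlist.foldl (innerBody puzzle) st.2], 0)) (acc, 0)).1
    = acc ++ ps.map (fun puzzle => wordlist.foldl (innerBody puzzle) 0) := by
  induction ps generalizing acc with
  | nil => simp
  | cons p ps ih =>
    simp only [List.foldl_cons, List.map_cons]
    rw [ih]
    simp

theorem spellingBeeSolutions_eq_map (wordlist ps : List String) :
    spellingBeeSolutions wordlist ps
      = ps.map (fun puzzle => wordlist.foldl (innerBody puzzle) 0) :=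
  (outer_foldl wordlist ps []).trans (List.nil_append _)

theorem foldl_all_short (p : String) (wl : List String)
    (hshort : ∀ w ∈ wl, PySem.Str.len w < 5) (acc : Int) :
    wl.foldl (innerBody p) acc = acc := by
  induction wl generalizing acc with
  | nil => simp
  | cons w wl ih =>
    have hw : PySem.Str.len w < 5 := hshort w List.mem_cons_self
    simp only [List.foldl_cons, innerBody, hw, if_pos, add_zero]
    exact ih (fun w hw => hshort w (List.mem_cons_of_mem _ hw)) acc

theorem pyGet?_head (p : String) (c : Char) (rest : List Char) (hc : p.toList = c :: rest) :
    PySem.Str.pyGet? p 0 = some c := by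
  have h0 : ((0 : Nat) : Int) = (0 : Int) := by norm_num
  rw [← h0, PySem.Str.pyGet?_natCast, hc]
  rfl

theorem isIn_singleton (c : Char) (w : String) :
    PySem.Str.isIn (String.ofList [c]) w = w.toList.contains c := by
  have h := PySem.Str.isIn_iff_infix (String.ofList [c]) w
  rw [String.toList_ofList, List.singleton_infix_iff] at h
  rw [Bool.eq_iff_iff, h, List.contains_iff_mem]

-- ---------- B-side lemmas ----------

-- per-word qualification predicate on positions (via List.getD, so non-dependent)
def wordOK (w : String) : Bool := decide (5 ≤ PySem.Str.len w)

theorem inner_insert_getD (chs : List Char) (bit : Nat) (d : PySem.Dict Char Nat) (c : Char) :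
    ((chs.foldl (fun d ch => d.insert ch (d.getD ch 0 ||| bit)) d).getD c 0)
      = if c ∈ chs then d.getD c 0 ||| bit else d.getD c 0 := by
  induction chs generalizing d with
  | nil => simp
  | cons ch chs ih =>
    simp only [List.foldl_cons, ih, PySem.Dict.getD_insert]
    by_cases h1 : c ∈ chs <;> by_cases h2 : c = ch <;>
      simp [h1, h2]

-- one position-indexed step: appending a word shifts nothing and adds position ws.length
theorem concat_bit (ws : List String) (w : String) (f : String → Bool) (j : Nat) :
    (decide (j < (ws ++ [w]).length) && f ((ws ++ [w]).getD j ""))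
      = ((decide (j < ws.length) && f (ws.getD j "")) || (decide (ws.length = j) && f w)) := by
  have hlen : (ws ++ [w]).length = ws.length + 1 := by simp
  by_cases h1 : j < ws.length
  · rw [List.getD_eq_getElem?_getD, List.getElem?_append_left h1, ← List.getD_eq_getElem?_getD,
        hlen, decide_eq_true (show j < ws.length + 1 by omega), decide_eq_true h1,
        decide_eq_false (show ¬ ws.length = j by omega)]
    simp
  · by_cases h2 : j = ws.length
    · subst h2
      have hg : (ws ++ [w]).getD ws.length "" = w := by
        rw [List.getD_eq_getElem?_getD]; simp
      rw [hg, hlen, decide_eq_true (show ws.length < ws.length + 1 by omega),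
          decide_eq_false (show ¬ ws.length < ws.length by omega), decide_eq_true rfl]
      simp
    · rw [hlen, decide_eq_false (show ¬ j < ws.length + 1 by omega), decide_eq_false h1,
          decide_eq_false (show ¬ ws.length = j by omega)]
      simp

theorem build_inv (ws : List String) :
    (ws.foldl bStep (PySem.Dict.empty, 0, 1)).2.2 = 2 ^ ws.length ∧
    (ws.foldl bStep (PySem.Dict.empty, 0, 1)).1.keys.Nodup ∧
    (∀ j, (ws.foldl bStep (PySem.Dict.empty, 0, 1)).2.1.testBit j
        = (decide (j < ws.length) && wordOK (ws.getD j ""))) ∧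
    (∀ c j, ((ws.foldl bStep (PySem.Dict.empty, 0, 1)).1.getD c 0).testBit j
        = (decide (j < ws.length) && (wordOK (ws.getD j "") && (ws.getD j "").toList.contains c))) := by
  induction ws using List.reverseRecOn with
  | nil =>
    refine ⟨by simp, by simp [PySem.Dict.keys_empty], ?_, ?_⟩
    · intro j
      simp [PySem.Dict.getD_empty, Nat.testBit, Nat.zero_shiftRight]
    · intro c j
      simp [PySem.Dict.getD_empty, Nat.testBit, Nat.zero_shiftRight]
  | append_singleton ws w ih =>
    obtain ⟨hbit, hnd, hlong, hidx⟩ := ih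
    rw [List.foldl_append, List.foldl_cons, List.foldl_nil]
    set st := ws.foldl bStep (PySem.Dict.empty, 0, 1) with hst
    by_cases hw : 5 ≤ PySem.Str.len w
    · simp only [bStep, if_pos hw]
      refine ⟨?_, ?_, ?_, ?_⟩
      · simp [hbit, Nat.shiftLeft_eq, Nat.pow_succ]
      · rw [PySem.Dict.keys_foldl_insert]
        exact PySem.Set.nodup_update _ _ hnd
      · intro j
        rw [Nat.testBit_or, hlong j, hbit, Nat.testBit_two_pow,
            concat_bit ws w wordOK j]
        have hww : wordOK w = true := decide_eq_true hw
        simp [hww]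
      · intro c j
        rw [inner_insert_getD, concat_bit ws w (fun s => wordOK s && s.toList.contains c) j]
        by_cases hc : c ∈ PySem.Set.ofList w.toList
        · rw [if_pos hc, Nat.testBit_or, hidx c j, hbit, Nat.testBit_two_pow]
          rw [PySem.Set.mem_ofList] at hc
          have h' : wordOK w = true := decide_eq_true hw
          simp [h', hc]
        · rw [if_neg hc, hidx c j]
          rw [PySem.Set.mem_ofList] at hc
          simp [hc]
    · simp only [bStep, if_neg hw]
      have hww : wordOK w = false := by rw [wordOK, decide_eq_false_iff_not]; exact hw
      refine ⟨?_, hnd, ?_, ?_⟩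
      · simp [hbit, Nat.shiftLeft_eq, Nat.pow_succ]
      · intro j
        rw [hlong j, concat_bit ws w wordOK j]
        simp [hww]
      · intro c j
        rw [hidx c j, concat_bit ws w (fun s => wordOK s && s.toList.contains c) j]
        simp [hww, Bool.and_assoc]

theorem bad_foldl_testBit (allowed : PySem.Set Char) (l : List (Char × Nat)) (acc : Nat) (j : Nat) :
    (l.foldl (fun b p => if !(PySem.Set.contains allowed p.1) then b ||| p.2 else b) acc).testBit j
      = (acc.testBit j || l.any (fun p => !(PySem.Set.contains allowed p.1) && p.2.testBit j)) := by
  induction l generalizing acc with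
  | nil => simp
  | cons p l ih =>
    simp only [List.foldl_cons, List.any_cons, ih]
    by_cases h : p.1 ∈ allowed <;>
      simp [h, Nat.testBit_or, Bool.or_assoc, Bool.or_comm, Bool.or_left_comm]

theorem bPopCount_rec (n : Nat) : bPopCount n = n % 2 + bPopCount (n / 2) := by
  by_cases h : n = 0
  · subst h
    simp
  · rw [bPopCount, if_neg h]

theorem bPopCount_eq_countP (k : Nat) : ∀ n, n < 2 ^ k →
    bPopCount n = (List.range k).countP n.testBit := by
  induction k with
  | zero =>
    intro n hn
    interval_cases n
    simp [bPopCount]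
  | succ k ih =>
    intro n hn
    rw [bPopCount_rec, List.range_succ_eq_map, List.countP_cons, List.countP_map]
    have hd : (List.range k).countP (n.testBit ∘ Nat.succ) = (List.range k).countP (n / 2).testBit := by
      apply List.countP_congr
      intro j _
      simp [Nat.testBit_succ]
    rw [hd, ← ih (n / 2) (by omega)]
    rcases Nat.mod_two_eq_zero_or_one n with h | h <;> simp [Nat.testBit_zero, h] <;> omega

theorem countP_range_getD (l : List String) (p : String → Bool) :
    (List.range l.length).countP (fun j => p (l.getD j "")) = l.countP p := by
  induction l using List.reverseRecOn with
  | nil => simp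
  | append_singleton l a ih =>
    have hlen : (l ++ [a]).length = l.length + 1 := by simp
    rw [hlen, List.range_succ, List.countP_append, List.countP_append]
    have h1 : (List.range l.length).countP (fun j => p ((l ++ [a]).getD j "")) =
        (List.range l.length).countP (fun j => p (l.getD j "")) := by
      apply List.countP_congr
      intro j hj
      rw [List.mem_range] at hj
      rw [List.getD_eq_getElem?_getD, List.getD_eq_getElem?_getD, List.getElem?_append_left hj]
    have h2 : (l ++ [a]).getD l.length "" = a := by
      rw [List.getD_eq_getElem?_getD]
      simp
    rw [h1, ih, List.countP_singleton, List.countP_singleton, h2]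

-- B's per-puzzle predicate equals A's
theorem pred_pointwise (c0 : Char) (puzzle w : String) :
    (wordOK w && w.toList.contains c0
      && PySem.Set.issubset (PySem.Set.ofList w.toList) (PySem.Set.ofList puzzle.toList))
    = predA c0 puzzle w := by
  rw [predA, isIn_singleton, wordOK]
  have h1 : (!decide (PySem.Str.len w < 5)) = decide (5 ≤ PySem.Str.len w) := by
    rw [← decide_not, decide_eq_decide]
    exact not_lt
  rw [h1]

-- main B-side computation: the per-puzzle value is A's count
theorem alt_count (ws : List String) (p : String) (c0 : Char) :
    (let st := ws.foldl bStep (PySem.Dict.empty, 0, 1)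
     let allowed := PySem.Set.ofList p.toList
     let bad := st.1.items.foldl
        (fun b q => if !(PySem.Set.contains allowed q.1) then b ||| q.2 else b) 0
     bPopCount ((st.1.getD c0 0 &&& st.2.1).ldiff bad))
    = ws.countP (predA c0 p) := by
  obtain ⟨hbit, hnd, hlong, hidx⟩ := build_inv ws
  set st := ws.foldl bStep (PySem.Dict.empty, 0, 1) with hst
  set allowed := PySem.Set.ofList p.toList with hallowed
  set bad := st.1.items.foldl
      (fun b q => if !(PySem.Set.contains allowed q.1) then b ||| q.2 else b) 0 with hbad
  set valid := (st.1.getD c0 0 &&& st.2.1).ldiff bad with hvalid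
  -- characterize bad's bits
  have hbadbit : ∀ j, bad.testBit j
      = st.1.keys.any (fun c => !(PySem.Set.contains allowed c) && (st.1.getD c 0).testBit j) := by
    intro j
    rw [hbad, bad_foldl_testBit, PySem.Dict.items_eq_map_keys st.1 hnd 0, List.any_map]
    simp [Function.comp_def, Nat.testBit, Nat.zero_shiftRight]
  -- characterize valid's bits
  have hvalidbit : ∀ j, valid.testBit j
      = (decide (j < ws.length) && (wordOK (ws.getD j "") && ((ws.getD j "").toList.contains c0
          && PySem.Set.issubset (PySem.Set.ofList (ws.getD j "").toList) (PySem.Set.ofList p.toList)))) := by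
    intro j
    rw [hvalid, Nat.testBit_ldiff, Nat.testBit_and, hidx c0 j, hlong j, hbadbit j]
    by_cases h1 : j < ws.length
    case neg =>
      rw [decide_eq_false h1]
      simp
    rw [decide_eq_true h1]
    set wj := ws.getD j "" with hwj
    have hsub_iff : PySem.Set.issubset (PySem.Set.ofList wj.toList) (PySem.Set.ofList p.toList) = true
        ↔ ∀ x ∈ wj.toList, x ∈ p.toList := by
      rw [PySem.Set.issubset_iff]
      constructor
      · intro h x hx
        exact (PySem.Set.mem_ofList _ _).mp (h x ((PySem.Set.mem_ofList _ _).mpr hx))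
      · intro h x hx
        exact (PySem.Set.mem_ofList _ _).mpr (h x ((PySem.Set.mem_ofList _ _).mp hx))
    by_cases h2 : wordOK wj = true
    case neg =>
      rw [Bool.not_eq_true] at h2
      rw [h2]
      simp
    rw [h2]
    have hkey : (st.1.keys.any fun c => !allowed.contains c && (st.1.getD c 0).testBit j)
        = !(PySem.Set.issubset (PySem.Set.ofList wj.toList) (PySem.Set.ofList p.toList)) := by
      cases hb : PySem.Set.issubset (PySem.Set.ofList wj.toList) (PySem.Set.ofList p.toList) with
      | true =>
        have hall := hsub_iff.mp hb
        simp only [Bool.not_true]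
        rw [List.any_eq_false]
        intro c hck
        rw [hidx c j, ← hwj, decide_eq_true h1, h2, Bool.true_and, Bool.true_and]
        by_cases hcw : c ∈ wj.toList
        · have hca : allowed.contains c = true :=
            (PySem.Set.contains_iff _ _).mpr (by rw [hallowed, PySem.Set.mem_ofList]; exact hall c hcw)
          rw [hca, Bool.not_true, Bool.false_and]
          exact Bool.false_ne_true
        · have hc' : wj.toList.contains c = false :=
            Bool.eq_false_iff.mpr (fun hcc => hcw (List.contains_iff_mem.mp hcc))
          rw [hc', Bool.and_false]
          exact Bool.false_ne_true
      | false =>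
        have hnall : ¬ ∀ x ∈ wj.toList, x ∈ p.toList := fun h => by
          rw [hsub_iff.mpr h] at hb
          cases hb
        push_neg at hnall
        obtain ⟨c, hcw, hcp⟩ := hnall
        simp only [Bool.not_false]
        rw [List.any_eq_true]
        have hckey : c ∈ st.1.keys := by
          by_contra hck
          have h0 : st.1.getD c 0 = 0 := by
            apply PySem.Dict.getD_of_not_contains
            rw [PySem.Dict.contains_eq_decide_mem_keys]
            simp [hck]
          have hbitc := hidx c j
          rw [← hwj, h0, decide_eq_true h1, h2, Nat.zero_testBit, Bool.true_and, Bool.true_and] at hbitc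
          have hcc : wj.toList.contains c = true := List.contains_iff_mem.mpr hcw
          rw [hcc] at hbitc
          cases hbitc
        refine ⟨c, hckey, ?_⟩
        rw [Bool.and_eq_true, hidx c j, ← hwj, decide_eq_true h1, h2, Bool.true_and, Bool.true_and]
        refine ⟨?_, List.contains_iff_mem.mpr hcw⟩
        have hca : allowed.contains c = false :=
          Bool.eq_false_iff.mpr (fun hcc => hcp (by
            have hmem := (PySem.Set.contains_iff _ _).mp hcc
            rw [hallowed, PySem.Set.mem_ofList] at hmem
            exact hmem))
        rw [hca, Bool.not_false]
    rw [hkey, Bool.not_not]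
    simp [Bool.and_comm]
  -- valid is below 2^(ws.length)
  have hlt : valid < 2 ^ ws.length := by
    apply Nat.lt_pow_two_of_testBit
    intro j hj
    rw [hvalidbit j]
    simp [(show ¬ j < ws.length by omega)]
  rw [bPopCount_eq_countP ws.length valid hlt]
  have hcongr : (List.range ws.length).countP valid.testBit
      = (List.range ws.length).countP (fun j => predA c0 p (ws.getD j "")) := by
    apply List.countP_congr
    intro j hj
    rw [List.mem_range] at hj
    rw [hvalidbit j, ← pred_pointwise c0 p (ws.getD j "")]
    simp [hj]
    tauto
  rw [hcongr, countP_range_getD]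

-- ===== VERDICT (by name: the statement is the Claim_ definition above) =====
theorem spellingBeeSolutions_spec : Claim_equal_spellingBeeSolutions := by
  intro wordlist puzzles _ hpre
  unfold Spec_spellingBeeSolutions spellingBeeSolutions_alt
  rw [spellingBeeSolutions_eq_map]
  apply List.map_congr_left
  intro p hp
  by_cases hne : p = ""
  · subst hne
    rw [if_pos rfl]
    exact foldl_all_short "" wordlist (hpre hp) 0
  · rw [if_neg hne]
    obtain ⟨c0, rest, hcons⟩ : ∃ c rest, p.toList = c :: rest := by
      cases h : p.toList with
      | nil => exact absurd (String.toList_eq_nil_iff.mp h) hne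
      | cons c r => exact ⟨c, r, rfl⟩
    have hget : PySem.Str.pyGet? p 0 = some c0 := pyGet?_head p c0 rest hcons
    rw [hget, inner_foldl_count c0 p hget wordlist 0, zero_add]
    exact (congrArg (fun n : Nat => (n : Int)) (alt_count wordlist p c0)).symm
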